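-- pv_equiv track=rewrite | github.com/hwanggu-corgi/algorithm-practice | Programmers/2_뉴스_클러스터링/main.py | create_set
-- ===== SOURCE A (Python) =====
-- def create_set(s):
--     res = []
--     N = len(s)
--     s = s.upper()
--     i = 0
--     while i < (N-1):
--         if not (s[i].isalpha() and s[i+1].isalpha()):
--             i += 1
--             continue
--
--         res.append(s[i] + s[i+1])
--         i += 1
--
--     return res
-- ===== SOURCE B (Python) =====
-- def create_set(s):
--     # Segment the uppercased string into maximal alphabetic runs, then emit
--     # each run's adjacent pairs.
--     runs = []
--     cur = []
--     for ch in s.upper():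
--         if ch.isalpha():
--             cur.append(ch)
--         else:
--             if cur:
--                 runs.append(cur)
--             cur = []
--     if cur:
--         runs.append(cur)
--     res = []
--     for run in runs:
--         for a, b in zip(run, run[1:]):
--             res.append(a + b)
--     return res
-- ===== Notes on version B (the rewrite author's own statement) =====
-- stated objective: faster
-- what changed: Instead of an index loop testing isalpha on each adjacent pair, B segments the uppercased string into maximal alphabetic runs with an accumulator and then emits each run's adjacent bigrams via zip.
import Mathlib
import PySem

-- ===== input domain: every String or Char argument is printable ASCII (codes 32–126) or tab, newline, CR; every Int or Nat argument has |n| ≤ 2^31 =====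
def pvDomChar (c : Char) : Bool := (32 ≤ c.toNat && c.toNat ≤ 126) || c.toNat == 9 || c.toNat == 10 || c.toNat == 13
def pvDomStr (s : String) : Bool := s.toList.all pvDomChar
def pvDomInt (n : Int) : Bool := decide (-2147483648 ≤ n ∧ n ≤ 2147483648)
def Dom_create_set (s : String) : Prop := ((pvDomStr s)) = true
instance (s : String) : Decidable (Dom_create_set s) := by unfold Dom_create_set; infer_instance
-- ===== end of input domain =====

-- B segments the uppercased string into maximal alphabetic runs and emits each
-- run's adjacent bigrams; same output as A's index loop, different decomposition.

-- ===== PORT A =====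
def createSetLoop (u : List Char) (N : Int) (i : Int) (res : List String) : List String :=
  if _h : i < N - 1 then
    if !(PySem.Chars.isalpha (PySem.List.pyGetD u i ' ') &&
         PySem.Chars.isalpha (PySem.List.pyGetD u (i + 1) ' ')) then
      createSetLoop u N (i + 1) res
    else
      createSetLoop u N (i + 1)
        (res ++ [String.ofList [PySem.List.pyGetD u i ' ', PySem.List.pyGetD u (i + 1) ' ']])
  else res
termination_by (N - 1 - i).toNat
decreasing_by all_goals omega

def create_set (s : String) : List String :=
  createSetLoop (PySem.Chars.upper s.toList) (s.toList.length : Int) 0 []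

-- ===== PORT B =====
def pvPairs (run : List Char) : List String :=
  (run.zip run.tail).map (fun p => String.ofList [p.1, p.2])

def pvRuns (cur : List Char) : List Char → List (List Char)
  | [] => if cur = [] then [] else [cur.reverse]
  | c :: cs =>
    if PySem.Chars.isalpha c then pvRuns (c :: cur) cs
    else if cur = [] then pvRuns [] cs else cur.reverse :: pvRuns [] cs

def create_set_alt (s : String) : List String :=
  (pvRuns [] (PySem.Chars.upper s.toList)).flatMap pvPairs

-- ===== PRECONDITION & SPEC =====
def Spec_create_set (s : String) (out : List String) : Prop := out = create_set_alt s
instance (s : String) (out : List String) : Decidable (Spec_create_set s out) := by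
  unfold Spec_create_set; infer_instance

-- ===== CLAIM (what is proved, stated in full; the proofs are below) =====
def Claim_equal_create_set : Prop := ∀ (s : String), Dom_create_set s → Spec_create_set s (create_set s)

-- ===== LEMMAS AND PROOFS =====

-- A's loop, rephrased as a structural scan over the character list.
def pvScan : List Char → List String
  | a :: b :: r =>
    (if PySem.Chars.isalpha a && PySem.Chars.isalpha b then [String.ofList [a, b]] else []) ++
      pvScan (b :: r)
  | _ => []

-- the bigrams emitted while a maximal run is being extended: `prev` is the
-- previous character if it was alphabetic
def pvG : Option Char → List Char → List String
  | _, [] => []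
  | prev, c :: cs =>
    if PySem.Chars.isalpha c then
      (match prev with | some p => [String.ofList [p, c]] | none => []) ++ pvG (some c) cs
    else pvG none cs

theorem pvPairs_cons_cons (a b : Char) (r : List Char) :
    pvPairs (a :: b :: r) = String.ofList [a, b] :: pvPairs (b :: r) := by
  simp [pvPairs]

theorem pvPairs_append_singleton (xs : List Char) (c : Char) :
    pvPairs (xs ++ [c]) =
      pvPairs xs ++ (match xs.getLast? with | some p => [String.ofList [p, c]] | none => []) := by
  induction xs with
  | nil => rfl
  | cons a t ih =>
    cases t with
    | nil => rfl
    | cons b r =>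
      have : (a :: b :: r) ++ [c] = a :: b :: (r ++ [c]) := by simp
      rw [this, pvPairs_cons_cons]
      have h2 : (b :: r) ++ [c] = b :: (r ++ [c]) := by simp
      rw [← h2, ih, pvPairs_cons_cons]
      simp [List.getLast?_cons_cons]

theorem pvG_nil (p : Option Char) : pvG p [] = [] := by cases p <;> rfl
theorem pvG_cons (p : Option Char) (c : Char) (cs : List Char) :
    pvG p (c :: cs) =
      if PySem.Chars.isalpha c then
        (match p with | some q => [String.ofList [q, c]] | none => []) ++ pvG (some c) cs
      else pvG none cs := by
  cases p <;> rfl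

theorem pvScan_cons_cons (a b : Char) (r : List Char) :
    pvScan (a :: b :: r) =
      (if PySem.Chars.isalpha a && PySem.Chars.isalpha b then [String.ofList [a, b]] else []) ++
        pvScan (b :: r) := rfl

theorem pvG_runs (cs : List Char) : ∀ cur : List Char,
    (pvRuns cur cs).flatMap pvPairs = pvPairs cur.reverse ++ pvG cur.head? cs := by
  induction cs with
  | nil =>
    intro cur
    cases cur with
    | nil => rfl
    | cons a t => simp [pvRuns, pvG_nil]
  | cons c cs ih =>
    intro cur
    by_cases hc : PySem.Chars.isalpha c = true
    · rw [pvRuns]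
      simp only [hc, if_true]
      rw [ih (c :: cur)]
      have h1 : (c :: cur).reverse = cur.reverse ++ [c] := by simp
      rw [h1, pvPairs_append_singleton, List.getLast?_reverse, pvG_cons]
      simp only [hc, if_true, List.head?_cons, List.append_assoc]
    · rw [pvRuns]
      simp only [hc, if_false, Bool.false_eq_true]
      cases cur with
      | nil =>
        simp only [if_true]
        rw [ih [], pvG_cons]
        simp [hc, pvPairs]
      | cons a t =>
        simp only [List.cons_ne_nil, if_false]
        rw [List.flatMap_cons, ih [], pvG_cons]
        simp [hc, pvPairs]

theorem pvScan_eq_pvG (cs : List Char) : ∀ c : Char,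
    pvScan (c :: cs) = pvG (if PySem.Chars.isalpha c then some c else none) cs := by
  induction cs with
  | nil => intro c; cases h : PySem.Chars.isalpha c <;> simp [pvScan, pvG_nil]
  | cons b r ih =>
    intro c
    rw [pvScan_cons_cons, ih b, pvG_cons]
    cases hc : PySem.Chars.isalpha c <;> cases hb : PySem.Chars.isalpha b <;>
      simp

theorem pvScan_short (u : List Char) (h : u.length ≤ 1) : pvScan u = [] := by
  cases u with
  | nil => rfl
  | cons a t =>
    cases t with
    | nil => rfl
    | cons b r => simp at h

theorem createSetLoop_eq_scan (u : List Char) : ∀ (k : Nat) (res : List String),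
    createSetLoop u (u.length : Int) (k : Int) res = res ++ pvScan (u.drop k) := by
  intro k
  induction hk : u.length - k using Nat.strong_induction_on generalizing k with
  | _ n ih =>
  intro res
  rw [createSetLoop]
  by_cases h : (k : Int) < (u.length : Int) - 1
  · have hk1 : k + 1 < u.length := by omega
    have hk0 : k < u.length := by omega
    have e1 : PySem.List.pyGetD u (k : Int) ' ' = u[k] := by
      rw [PySem.List.pyGetD_natCast]; exact List.getD_eq_getElem u ' ' hk0
    have e2 : PySem.List.pyGetD u ((k : Int) + 1) ' ' = u[k + 1] := by
      have hcast : ((k : Int) + 1) = ((k + 1 : Nat) : Int) := by push_cast; ring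
      rw [hcast, PySem.List.pyGetD_natCast]
      exact List.getD_eq_getElem u ' ' hk1
    have hrec : ∀ r : List String,
        createSetLoop u (u.length : Int) ((k : Int) + 1) r = r ++ pvScan (u.drop (k + 1)) := by
      intro r
      have hcast : ((k : Int) + 1) = ((k + 1 : Nat) : Int) := by push_cast; ring
      rw [hcast]
      exact ih (u.length - (k + 1)) (by omega) (k + 1) rfl r
    have hd : u.drop k = u[k] :: u[k + 1] :: u.drop (k + 2) := by
      rw [List.drop_eq_getElem_cons hk0, List.drop_eq_getElem_cons hk1]
    have hd1 : u.drop (k + 1) = u[k + 1] :: u.drop (k + 2) := List.drop_eq_getElem_cons hk1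
    rw [dif_pos h, e1, e2]
    by_cases hab : (PySem.Chars.isalpha u[k] && PySem.Chars.isalpha u[k + 1]) = true
    · rw [if_neg (by simp [hab]), hrec, hd, pvScan_cons_cons, if_pos hab, ← hd1]
      simp
    · have habf : (PySem.Chars.isalpha u[k] && PySem.Chars.isalpha u[k + 1]) = false := by
        simpa using hab
      rw [if_pos (by simp [habf]), hrec, hd, pvScan_cons_cons, habf, ← hd1]
      simp
  · rw [dif_neg h, pvScan_short]
    · simp
    · have h2 : (u.drop k).length = u.length - k := by simp
      omega

-- ===== VERDICT (by name: the statement is the Claim_ definition above) =====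
theorem create_set_spec : Claim_equal_create_set := by
  intro s _
  unfold Spec_create_set create_set create_set_alt
  have hlen : (PySem.Chars.upper s.toList).length = s.toList.length := by
    simp [PySem.Chars.upper]
  set u := PySem.Chars.upper s.toList with hu
  rw [← hlen]
  have h0 : ((0 : Nat) : Int) = (0 : Int) := rfl
  rw [← h0, createSetLoop_eq_scan u 0 []]
  simp only [List.drop_zero, List.nil_append]
  cases hcu : u with
  | nil => rfl
  | cons c r =>
    rw [pvScan_eq_pvG, pvRuns]
    by_cases hc : PySem.Chars.isalpha c = true
    · rw [if_pos hc, if_pos hc, pvG_runs]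
      rfl
    · rw [if_neg hc, if_neg (by simpa using hc), if_pos rfl, pvG_runs]
      rfl
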